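-- pv_equiv track=rewrite | github.com/Archana21-bot/student-grade-analyzer | grade_analyzer.py | classify_grades
-- ===== SOURCE A (Python) =====
-- def classify_grades(averages):
--     grade_A = 90
--     grade_B = 75
--     grade_C = 60
--
--     classified = {}
--
--     for name, avg in averages.items():
--         if avg >= grade_A:
--             grade = "A"
--         elif avg >= grade_B:
--             grade = "B"
--         elif avg >= grade_C:
--             grade = "C"
--         else:
--             grade = "F"
--
--         classified[name] = (avg, grade)
--
--     return classified
-- ===== SOURCE B (Python) =====
-- def classify_grades(averages):
--     thresholds = [60, 75, 90]
--     labels = ["F", "C", "B", "A"]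
--     return dict(
--         (name, (avg, labels[sum(avg >= t for t in thresholds)]))
--         for name, avg in averages.items()
--     )
-- ===== Notes on version B (the rewrite author's own statement) =====
-- stated objective: idiomatic
-- what changed: Replaces the if/elif/else comparison chain and imperative dict-building loop with a data-driven threshold table: the grade index is computed arithmetically as sum(avg >= t for t in thresholds) into a parallel labels list, and the result dict is built at once from a generator via dict(...).
import Mathlib
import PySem

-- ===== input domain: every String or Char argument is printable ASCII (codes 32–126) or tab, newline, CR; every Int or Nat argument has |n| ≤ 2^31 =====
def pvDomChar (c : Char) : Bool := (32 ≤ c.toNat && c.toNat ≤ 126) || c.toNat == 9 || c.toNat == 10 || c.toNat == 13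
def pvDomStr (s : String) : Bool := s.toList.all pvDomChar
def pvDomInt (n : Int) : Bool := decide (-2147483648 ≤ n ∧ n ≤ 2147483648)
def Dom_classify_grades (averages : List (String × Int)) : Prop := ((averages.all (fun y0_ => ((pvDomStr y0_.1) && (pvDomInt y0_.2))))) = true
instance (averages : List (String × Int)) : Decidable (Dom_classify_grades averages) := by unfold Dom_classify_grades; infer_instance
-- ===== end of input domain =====

-- ===== PORT A =====
-- the if/elif/else chain of A, building the result dict entry by entry
def classify_grades (averages : List (String × Int)) : List (String × Int × String) :=
  (averages.foldl (fun classified p =>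
      classified.insert p.1 (p.2,
        if p.2 ≥ 90 then "A" else if p.2 ≥ 75 then "B" else if p.2 ≥ 60 then "C" else "F"))
    (PySem.Dict.empty : PySem.Dict String (Int × String))).items

-- ===== PORT B =====
-- B: threshold table + arithmetic index (sum of comparisons = countP), dict built at once from the mapped pairs
def classify_grades_alt (averages : List (String × Int)) : List (String × Int × String) :=
  (PySem.Dict.ofList (averages.map (fun p =>
      (p.1, (p.2, PySem.List.pyGetD ["F", "C", "B", "A"]
        (([60, 75, 90] : List Int).countP (fun t => p.2 ≥ t) : Int) ""))))).items

-- ===== PRECONDITION & SPEC =====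
-- Pre_ states the Python-dict invariant on the association-list encoding: keys are pairwise distinct
-- (a Python dict can never present duplicate keys, so this excludes no actual input of A).
def Pre_classify_grades (averages : List (String × Int)) : Prop := (averages.map Prod.fst).Nodup
instance (averages : List (String × Int)) : Decidable (Pre_classify_grades averages) := by unfold Pre_classify_grades; infer_instance
def pvWitness_classify_grades : (List (String × Int)) := [("ann", 91), ("bob", 60), ("cho", -5)]
def Spec_classify_grades (averages : List (String × Int)) (out : List (String × Int × String)) : Prop := out = classify_grades_alt averages
instance (averages : List (String × Int)) (out : List (String × Int × String)) : Decidable (Spec_classify_grades averages out) := by unfold Spec_classify_grades; infer_instance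

-- ===== CLAIM (what is proved, stated in full; the proofs are below) =====
def Claim_equal_classify_grades : Prop := ∀ (averages : List (String × Int)), Dom_classify_grades averages → Pre_classify_grades averages → Spec_classify_grades averages (classify_grades averages)

-- ===== LEMMAS AND PROOFS =====
-- the grade of one average: A's comparison chain equals B's table lookup
lemma grade_eq (a : Int) :
    (if a ≥ 90 then "A" else if a ≥ 75 then "B" else if a ≥ 60 then "C" else "F")
      = PySem.List.pyGetD ["F", "C", "B", "A"]
          (([60, 75, 90] : List Int).countP (fun t => a ≥ t) : Int) "" := by
  split_ifs with h1 h2 h3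
  · rw [show ([60,75,90] : List Int).countP (fun t => a ≥ t) = 3 by
      simp [List.countP, List.countP.go, show (60:Int) ≤ a by omega, show (75:Int) ≤ a by omega,
            show (90:Int) ≤ a by omega]]
    decide
  · rw [show ([60,75,90] : List Int).countP (fun t => a ≥ t) = 2 by
      simp [List.countP, List.countP.go, show (60:Int) ≤ a by omega, show (75:Int) ≤ a by omega,
            show ¬ (90:Int) ≤ a by omega]]
    decide
  · rw [show ([60,75,90] : List Int).countP (fun t => a ≥ t) = 1 by
      simp [List.countP, List.countP.go, show (60:Int) ≤ a by omega, show ¬ (75:Int) ≤ a by omega,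
            show ¬ (90:Int) ≤ a by omega]]
    decide
  · rw [show ([60,75,90] : List Int).countP (fun t => a ≥ t) = 0 by
      simp [List.countP, List.countP.go, show ¬ (60:Int) ≤ a by omega, show ¬ (75:Int) ≤ a by omega,
            show ¬ (90:Int) ≤ a by omega]]
    decide

-- ===== VERDICT (by name: the statement is the Claim_ definition above) =====
theorem classify_grades_spec : Claim_equal_classify_grades := by
  intro av _ hpre
  unfold Spec_classify_grades classify_grades classify_grades_alt
  rw [PySem.Dict.items_foldl_insert_fresh av Prod.fst
        (fun p => (p.2, if p.2 ≥ 90 then "A" else if p.2 ≥ 75 then "B" else if p.2 ≥ 60 then "C" else "F"))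
        PySem.Dict.empty (by simp) hpre]
  show _ = (PySem.Dict.empty.update _).items
  rw [PySem.Dict.update,
      PySem.Dict.items_foldl_insert_fresh _ Prod.fst Prod.snd PySem.Dict.empty (by simp)
        (by simpa [List.map_map, Function.comp] using hpre)]
  simp [List.map_map, Function.comp, grade_eq]
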